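-- pv_equiv track=rewrite | github.com/EdmundOgban/Mjollnir | core/utils/__init__.py | split_umodes
-- ===== SOURCE A (Python) =====
-- def split_umodes(modes):
--     out = []
--     sign = None
--     for c in modes:
--         if c in '+-':
--             sign = c
--         else:
--             out.append([sign, c])
--
--     return out
-- ===== SOURCE B (Python) =====
-- def split_umodes(modes):
--     # Two-phase: split into maximal runs of non-sign chars; each run's sign is
--     # the character immediately preceding it (a sign char, or None at position 0).
--     out = []
--     n = len(modes)
--     i = 0
--     while i < n:
--         if modes[i] in '+-':
--             i += 1
--             continue
--         j = i
--         while j < n and modes[j] not in '+-':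
--             j += 1
--         sign = modes[i - 1] if i > 0 else None
--         out.extend([sign, c] for c in modes[i:j])
--         i = j
--     return out
-- ===== Notes on version B (the rewrite author's own statement) =====
-- stated objective: alternative
-- what changed: Replaces the single flat loop threading a running sign across every character by a two-phase segmentation: split the string into maximal runs of non-sign characters and read each run's sign directly as the character just before the run (None at position 0), then expand each run into pairs.
import Mathlib
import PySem

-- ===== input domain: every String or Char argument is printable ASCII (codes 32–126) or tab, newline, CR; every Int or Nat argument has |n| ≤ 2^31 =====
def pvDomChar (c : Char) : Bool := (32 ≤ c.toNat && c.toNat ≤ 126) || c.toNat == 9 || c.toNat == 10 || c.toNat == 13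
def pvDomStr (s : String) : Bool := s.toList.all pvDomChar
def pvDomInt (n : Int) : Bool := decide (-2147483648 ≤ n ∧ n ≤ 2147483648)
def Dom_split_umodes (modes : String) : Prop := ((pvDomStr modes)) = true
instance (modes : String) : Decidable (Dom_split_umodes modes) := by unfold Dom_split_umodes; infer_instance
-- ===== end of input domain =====

-- B replaces A's running-sign flat loop by segmentation into sign-free runs (sign = char before the run); equal return value proved on the whole domain.

-- ===== PORT A =====
-- fold state = (out, sign), exactly A's loop
def pvStepA (st : List (List (Option String)) × Option String) (c : Char) :
    List (List (Option String)) × Option String :=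
  if c == '+' || c == '-' then (st.1, some (String.ofList [c]))
  else (st.1 ++ [[st.2, some (String.ofList [c])]], st.2)

def split_umodes (modes : String) : List (List (Option String)) :=
  (modes.toList.foldl pvStepA ([], none)).1

-- ===== PORT B =====
def pvPairB (prev : Option Char) (c : Char) : List (Option String) :=
  [prev.map (fun s => String.ofList [s]), some (String.ofList [c])]

-- B's while-loop: skip sign chars (remembering the last one as the char just
-- before the next run, i.e. B's modes[i-1]); at a run start take the maximal
-- sign-free run (B's inner j-scan / modes[i:j]) and expand it into pairs.
def pvGoB (prev : Option Char) : List Char → List (List (Option String))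
  | [] => []
  | c :: rest =>
    if c == '+' || c == '-' then pvGoB (some c) rest
    else
      (c :: rest.takeWhile (fun d => !(d == '+' || d == '-'))).map (pvPairB prev)
        ++ pvGoB prev (rest.dropWhile (fun d => !(d == '+' || d == '-')))
termination_by l => l.length
decreasing_by
  all_goals simp only [List.length_cons]
  all_goals first
    | exact Nat.lt_succ_of_le (List.length_dropWhile_le _ _)
    | omega

def split_umodes_alt (modes : String) : List (List (Option String)) :=
  pvGoB none modes.toList

-- ===== PRECONDITION & SPEC =====
def Spec_split_umodes (modes : String) (out : List (List (Option String))) : Prop := out = split_umodes_alt modes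
instance (modes : String) (out : List (List (Option String))) : Decidable (Spec_split_umodes modes out) := by unfold Spec_split_umodes; infer_instance

-- ===== CLAIM (what is proved, stated in full; the proofs are below) =====
def Claim_equal_split_umodes : Prop := ∀ (modes : String), Dom_split_umodes modes → Spec_split_umodes modes (split_umodes modes)

-- ===== LEMMAS AND PROOFS =====

lemma pvGoB_cons_nonsign (prev : Option Char) (c : Char) (rest : List Char)
    (h : (c == '+' || c == '-') = false) :
    pvGoB prev (c :: rest) = pvPairB prev c :: pvGoB prev rest := by
  cases rest with
  | nil => simp [pvGoB, h]
  | cons e rest2 =>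
    by_cases he : (e == '+' || e == '-') = true
    · simp [pvGoB, h, he, List.takeWhile, List.dropWhile]
    · simp only [Bool.not_eq_true] at he
      simp [pvGoB, h, he, List.takeWhile, List.dropWhile]

lemma foldA_eq_goB (l : List Char) (acc : List (List (Option String))) (prev : Option Char) :
    (l.foldl pvStepA (acc, prev.map (fun s => String.ofList [s]))).1 = acc ++ pvGoB prev l := by
  induction l generalizing acc prev with
  | nil => simp [pvGoB]
  | cons c rest ih =>
    by_cases hc : (c == '+' || c == '-') = true
    · have : pvStepA (acc, prev.map (fun s => String.ofList [s])) c
          = (acc, (some c).map (fun s => String.ofList [s])) := by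
        simp [pvStepA, hc]
      simp only [List.foldl_cons, this, ih]
      cases rest with
      | nil => simp [pvGoB, hc]
      | cons e r => simp [pvGoB, hc]
    · simp only [Bool.not_eq_true] at hc
      have hstep : pvStepA (acc, prev.map (fun s => String.ofList [s])) c
          = (acc ++ [pvPairB prev c], prev.map (fun s => String.ofList [s])) := by
        simp [pvStepA, hc, pvPairB]
      simp only [List.foldl_cons, hstep, ih, pvGoB_cons_nonsign prev c rest hc]
      simp

-- ===== VERDICT (by name: the statement is the Claim_ definition above) =====
theorem split_umodes_spec : Claim_equal_split_umodes := by
  intro modes _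
  unfold Spec_split_umodes split_umodes split_umodes_alt
  simpa using foldA_eq_goB modes.toList [] none
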